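-- pv_equiv track=rewrite | github.com/CHANCHALCHAVHAN/Company_Problem-statement-and-its-Solutions | Optimal Energy Zone Allocation.py | count_divisions
-- ===== SOURCE A (Python) =====
-- def count_divisions(N, E):
--     # Calculate prefix sums
--     prefix_sum = [0] * (N + 1)
--     for i in range(1, N + 1):
--         prefix_sum[i] = prefix_sum[i - 1] + E[i - 1]
--
--     total_ways = 0
--     for alpha_size in range(1, N // 2 + 1):
--         gamma_start = N - alpha_size + 1
--         if gamma_start <= alpha_size + 1:
--             break
--
--         alpha_energy = prefix_sum[alpha_size]  # Sum of Alpha zone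
--         gamma_energy = prefix_sum[N] - prefix_sum[N - alpha_size]  # Sum of Gamma zone
--
--         beta_energy = prefix_sum[gamma_start - 1] - prefix_sum[alpha_size]
--
--         if alpha_energy + gamma_energy > beta_energy:
--             total_ways += 1
--
--     return total_ways
-- ===== SOURCE B (Python) =====
-- def count_divisions(N, E):
--     # Count k with 1 <= k <= (N-1)//2 such that 2*(sum(E[:k]) + sum(E[N-k:N])) > sum(E[:N]):
--     # algebraic restatement of "alpha + gamma > beta", zone sums recomputed by slicing.
--     total_energy = sum(E[:N])
--     ways = 0
--     for k in range(1, (N - 1) // 2 + 1):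
--         if 2 * (sum(E[:k]) + sum(E[N - k:N])) > total_energy:
--             ways += 1
--     return ways
-- ===== Notes on version B (the rewrite author's own statement) =====
-- stated objective: simpler
-- what changed: drops the prefix-sum table and the in-loop break: B folds the break into the loop bound (N-1)//2, recomputes the two outer zone sums by direct slicing each iteration, and tests the algebraically equivalent condition 2*(alpha+gamma) > total instead of alpha+gamma > beta
import Mathlib
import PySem

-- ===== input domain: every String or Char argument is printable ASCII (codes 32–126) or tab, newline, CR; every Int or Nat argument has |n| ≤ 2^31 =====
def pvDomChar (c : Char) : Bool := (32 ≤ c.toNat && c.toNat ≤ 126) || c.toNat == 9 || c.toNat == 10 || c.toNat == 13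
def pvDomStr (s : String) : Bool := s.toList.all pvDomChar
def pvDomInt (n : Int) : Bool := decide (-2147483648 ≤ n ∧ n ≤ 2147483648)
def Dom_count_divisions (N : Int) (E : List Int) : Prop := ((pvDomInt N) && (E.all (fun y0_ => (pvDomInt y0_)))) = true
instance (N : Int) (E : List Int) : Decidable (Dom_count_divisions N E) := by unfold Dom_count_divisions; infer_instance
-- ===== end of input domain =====

-- B drops A's prefix-sum table and in-loop break: loop bound (N-1)//2, zone sums by direct slicing,
-- algebraically equivalent test 2*(alpha+gamma) > total. Objective: simpler (B is O(N^2) vs A's O(N)).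


-- ===== PORT A =====
-- prefix_sum = [0]*(N+1); for i in range(1, N+1): prefix_sum[i] = prefix_sum[i-1] + E[i-1]
def pvBuildPrefix (N : Int) (E : List Int) : List Int :=
  (PySem.List.pyRange 1 (N + 1) 1).foldl
    (fun ps i =>
      PySem.List.pySetD ps i (PySem.List.pyGetD ps (i - 1) 0 + PySem.List.pyGetD E (i - 1) 0))
    (List.replicate (N + 1).toNat 0)

-- the 'for alpha_size in range(...)' loop with its break, as structural recursion on the range list
def pvALoop (ps : List Int) (N : Int) : List Int → Int → Int
  | [], total => total
  | k :: ks, total =>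
    if N - k + 1 ≤ k + 1 then total
    else
      let alpha := PySem.List.pyGetD ps k 0
      let gamma := PySem.List.pyGetD ps N 0 - PySem.List.pyGetD ps (N - k) 0
      let beta := PySem.List.pyGetD ps (N - k + 1 - 1) 0 - PySem.List.pyGetD ps k 0
      pvALoop ps N ks (if alpha + gamma > beta then total + 1 else total)

def count_divisions (N : Int) (E : List Int) : Int :=
  pvALoop (pvBuildPrefix N E) N (PySem.List.pyRange 1 (PySem.Int.floordiv N 2 + 1) 1) 0

-- ===== PORT B =====
def count_divisions_alt (N : Int) (E : List Int) : Int :=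
  let total_energy := (PySem.List.slice E none (some N)).sum
  (PySem.List.pyRange 1 (PySem.Int.floordiv (N - 1) 2 + 1) 1).foldl
    (fun ways k =>
      if 2 * ((PySem.List.slice E none (some k)).sum
              + (PySem.List.slice E (some (N - k)) (some N)).sum) > total_energy
      then ways + 1 else ways)
    0

-- ===== PRECONDITION & SPEC =====
-- A raises IndexError (E[i-1] in the prefix loop) exactly when N > len(E); nothing else is excluded.
def Pre_count_divisions (N : Int) (E : List Int) : Prop := N ≤ E.length
instance (N : Int) (E : List Int) : Decidable (Pre_count_divisions N E) := by unfold Pre_count_divisions; infer_instance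
def pvWitness_count_divisions : Int × List Int := (5, [3, -1, 4, 1, 5])
def Spec_count_divisions (N : Int) (E : List Int) (out : Int) : Prop := out = count_divisions_alt N E
instance (N : Int) (E : List Int) (out : Int) : Decidable (Spec_count_divisions N E out) := by unfold Spec_count_divisions; infer_instance

-- ===== CLAIM (what is proved, stated in full; the proofs are below) =====
def Claim_equal_count_divisions : Prop := ∀ (N : Int) (E : List Int), Dom_count_divisions N E → Pre_count_divisions N E → Spec_count_divisions N E (count_divisions N E)

-- ===== LEMMAS AND PROOFS =====

-- the prefix-sum fold of A computes the list of partial sums (invariant over the build loop)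
theorem pvBuildPrefix_loop (E : List Int) (n : Nat) (hn : n ≤ E.length) :
    ∀ m : Nat, m ≤ n →
      (PySem.List.pyRange 1 ((m : Int) + 1) 1).foldl
        (fun ps i =>
          PySem.List.pySetD ps i (PySem.List.pyGetD ps (i - 1) 0 + PySem.List.pyGetD E (i - 1) 0))
        (List.replicate (n + 1) 0)
      = (List.range (m + 1)).map (fun t => (E.take t).sum) ++ List.replicate (n - m) 0 := by
  intro m
  induction m with
  | zero =>
    intro _
    rw [PySem.List.pyRange_one_eq_nil (by omega)]
    simp [List.replicate_succ]
  | succ m ih =>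
    intro hm
    have hrange : PySem.List.pyRange 1 (((m : Int) + 1) + 1) 1
        = PySem.List.pyRange 1 ((m : Int) + 1) 1 ++ [(m : Int) + 1] := by
      exact PySem.List.pyRange_one_succ_right (by omega)
    have : ((m + 1 : Nat) : Int) + 1 = ((m : Int) + 1) + 1 := by omega
    rw [this, hrange, List.foldl_append, ih (by omega)]
    -- one step: set index m+1 to (take m).sum + E[m]
    simp only [List.foldl_cons, List.foldl_nil]
    have hlenA : ((List.range (m + 1)).map (fun t => (E.take t).sum)).length = m + 1 := by simp
    have hmlt : m < E.length := by omega
    have hrep : n - m = (n - (m + 1)) + 1 := by omega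
    have hget1 : PySem.List.pyGetD
        ((List.range (m + 1)).map (fun t => (E.take t).sum) ++ List.replicate (n - m) 0)
        (((m : Int) + 1) - 1) 0 = (E.take m).sum := by
      have h1 : ((m : Int) + 1) - 1 = ((m : Nat) : Int) := by omega
      rw [h1, PySem.List.pyGetD_natCast]
      rw [List.getD_eq_getElem?_getD, List.getElem?_append_left (by omega)]
      simp
    have hget2 : PySem.List.pyGetD E (((m : Int) + 1) - 1) 0 = E[m] := by
      have h1 : ((m : Int) + 1) - 1 = ((m : Nat) : Int) := by omega
      rw [h1, PySem.List.pyGetD_natCast]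
      rw [List.getD_eq_getElem?_getD, List.getElem?_eq_getElem hmlt]
      rfl
    rw [hget1, hget2]
    have hset : ((m : Int) + 1) = (((m + 1 : Nat)) : Int) := by omega
    rw [hset, PySem.List.pySetD_natCast]
    rw [hrep, List.replicate_succ]
    rw [List.set_append_right _ _ (by omega)]
    rw [hlenA, Nat.sub_self, List.set_cons_zero]
    conv_rhs => rw [List.range_succ, List.map_append, List.append_assoc]
    have hv : (E.take m).sum + E[m] = (E.take (m + 1)).sum :=
      Eq.symm (List.sum_take_succ E m hmlt)
    rw [hv]
    simp
  
theorem pvBuildPrefix_eq (E : List Int) (n : Nat) (hn : n ≤ E.length) :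
    pvBuildPrefix (n : Int) E = (List.range (n + 1)).map (fun t => (E.take t).sum) := by
  unfold pvBuildPrefix
  have h1 : ((n : Int) + 1).toNat = n + 1 := by omega
  rw [h1]
  have := pvBuildPrefix_loop E n hn n (le_refl n)
  simpa using this

-- reading the prefix list at an in-range index
theorem pvPrefix_get (E : List Int) (n : Nat) (j : Int) (h0 : 0 ≤ j) (hj : j ≤ n) :
    PySem.List.pyGetD ((List.range (n + 1)).map (fun t => (E.take t).sum)) j 0
      = (E.take j.toNat).sum := by
  have hb : j < (((List.range (n + 1)).map (fun t => (E.take t).sum)).length : Int) := by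
    simp; omega
  rw [PySem.List.pyGetD_eq_getElem _ 0 h0 hb]
  simp


-- A's loop stops at the first break element
theorem pvALoop_break_head (ps : List Int) (N : Int) (k : Int) (ks : List Int) (t : Int)
    (h : N - k + 1 ≤ k + 1) : pvALoop ps N (k :: ks) t = t := by
  rw [pvALoop, if_pos h]

-- ===== VERDICT (by name: the statement is the Claim_ definition above) =====
theorem count_divisions_spec : Claim_equal_count_divisions := by
  intro N E _ hpre
  unfold Spec_count_divisions count_divisions count_divisions_alt
  by_cases hN2 : N ≤ 1
  · -- both ranges are empty
    rw [PySem.List.pyRange_one_eq_nil (a := 1) (b := PySem.Int.floordiv N 2 + 1) (by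
      have := PySem.Int.floordiv_lt_iff_lt_mul (a := N) (b := 2) (q := 1) (by omega)
      omega)]
    rw [PySem.List.pyRange_one_eq_nil (a := 1) (b := PySem.Int.floordiv (N - 1) 2 + 1) (by
      have := PySem.Int.floordiv_lt_iff_lt_mul (a := N - 1) (b := 2) (q := 1) (by omega)
      omega)]
    rfl
  · set n : Nat := N.toNat with hn
    have hNn : N = (n : Int) := by omega
    have hnE : n ≤ E.length := by unfold Pre_count_divisions at hpre; omega
    -- floordiv brackets
    set q : Int := PySem.Int.floordiv N 2 with hq
    set h : Int := PySem.Int.floordiv (N - 1) 2 with hh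
    have hqb : q * 2 ≤ N ∧ N < (q + 1) * 2 := by
      have := PySem.Int.floordiv_mul_add_mod N 2
      have h1 := PySem.Int.mod_nonneg (a := N) (b := 2) (by omega)
      have h2 := PySem.Int.mod_lt (a := N) (b := 2) (by omega)
      omega
    have hhb : h * 2 ≤ N - 1 ∧ N - 1 < (h + 1) * 2 := by
      have := PySem.Int.floordiv_mul_add_mod (N - 1) 2
      have h1 := PySem.Int.mod_nonneg (a := N - 1) (b := 2) (by omega)
      have h2 := PySem.Int.mod_lt (a := N - 1) (b := 2) (by omega)
      omega
    have hh0 : 0 ≤ h := by omega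
    have hhq : h ≤ q ∧ q ≤ h + 1 := by omega
    -- split A's range at h+1
    rw [PySem.List.pyRange_one_append 1 (h + 1) (q + 1) (by omega) (by omega)]
    have hps := pvBuildPrefix_eq E n hnE
    rw [← hNn] at hps
    -- no break in the first chunk
    have hnb : ∀ k ∈ PySem.List.pyRange 1 (h + 1) 1, ¬ (N - k + 1 ≤ k + 1) := by
      intro k hk
      rw [PySem.List.mem_pyRange_one] at hk
      omega
    have htail : ∀ t : Int, pvALoop (pvBuildPrefix N E) N (PySem.List.pyRange (h + 1) (q + 1) 1) t = t := by
      intro t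
      rcases (lt_or_ge h q) with hlt | hge
      · have hq' : q = h + 1 := by omega
        rw [hq', PySem.List.pyRange_one_cons (by omega),
            PySem.List.pyRange_one_eq_nil (by omega)]
        exact pvALoop_break_head _ _ _ _ _ (by omega)
      · rw [PySem.List.pyRange_one_eq_nil (by omega)]; rfl
    -- aLoop over the appended list: fold the no-break part, then the tail is a no-op
    have happ : ∀ (xs ys : List Int) (t : Int), (∀ k ∈ xs, ¬ (N - k + 1 ≤ k + 1)) →
        pvALoop (pvBuildPrefix N E) N (xs ++ ys) t
          = pvALoop (pvBuildPrefix N E) N ys (xs.foldl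
              (fun t k =>
                if PySem.List.pyGetD (pvBuildPrefix N E) k 0
                    + (PySem.List.pyGetD (pvBuildPrefix N E) N 0 - PySem.List.pyGetD (pvBuildPrefix N E) (N - k) 0)
                    > PySem.List.pyGetD (pvBuildPrefix N E) (N - k + 1 - 1) 0 - PySem.List.pyGetD (pvBuildPrefix N E) k 0
                 then t + 1 else t) t) := by
      intro xs ys t hxs
      induction xs generalizing t with
      | nil => rfl
      | cons x xs ih =>
        rw [List.cons_append, pvALoop, if_neg (hxs x (by simp)), List.foldl_cons]
        exact ih _ (fun k hk => hxs k (by simp [hk]))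
    rw [happ _ _ 0 hnb, htail]
    -- both sides are folds over the same range; compare bodies for members
    apply PySem.List.foldl_congr_mem
    intro t k hk
    rw [PySem.List.mem_pyRange_one] at hk
    have hk1 : 1 ≤ k := hk.1
    have hk2 : 2 * k ≤ N - 1 := by omega
    -- prefix reads
    rw [hps]
    rw [pvPrefix_get E n k (by omega) (by omega)]
    rw [pvPrefix_get E n N (by omega) (by omega)]
    rw [show N - k + 1 - 1 = N - k by ring]
    rw [pvPrefix_get E n (N - k) (by omega) (by omega)]
    -- slice sums
    have hsl1 : (PySem.List.slice E none (some k)).sum = (E.take k.toNat).sum := by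
      rw [PySem.List.slice_to E (by omega)]
    have hslN : (PySem.List.slice E none (some N)).sum = (E.take n).sum := by
      rw [PySem.List.slice_to E (by omega)]
    have hsl2 : (PySem.List.slice E (some (N - k)) (some N)).sum
        = (E.take n).sum - (E.take (N - k).toNat).sum := by
      rw [PySem.List.slice_toNat E (by omega) (by omega)]
      have hu : (N - k).toNat ≤ n := by omega
      have hdecomp : E.take n = E.take (N - k).toNat ++ (E.drop (N - k).toNat).take (n - (N - k).toNat) := by
        rw [← List.take_add]
        congr 1
        omega
      have hNtoNat : N.toNat - (N - k).toNat = n - (N - k).toNat := by omega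
      rw [hNtoNat]
      have := congrArg List.sum hdecomp
      rw [List.sum_append] at this
      omega
    simp only [hsl1, hslN, hsl2]
    rw [show N.toNat = n from hn.symm]
    -- the two conditions are equivalent linear inequalities
    rcases lt_or_ge (2 * ((E.take k.toNat).sum + ((E.take n).sum - (E.take (N - k).toNat).sum))) ((E.take n).sum + 1) with hc | hc
    · rw [if_neg (by omega), if_neg (by omega)]
    · rw [if_pos (by omega), if_pos (by omega)]
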